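-- pv_equiv track=rewrite | github.com/wanmok/iterx | src/iterx/metrics/muc/ceaf_rme.py | phi_for_clusters_rme
-- ===== SOURCE A (Python) =====
-- from typing import OrderedDict, List, Union, Tuple, Optional, Callable
--
-- IterXEntity = List[Tuple[str, str, str]]  # (template_type, slot_type, mention_str)
--
-- def phi_for_clusters_rme(
--         gold_clustering: List[IterXEntity],
--         predicted_clustering: List[IterXEntity],
--         one_to_one: bool = False
-- ) -> Tuple[int, int]:
--     def count_cluster_match(a, b):
--         count_match = 0
--         matched_cluster = set()
--         has_seen = set()
--         for c_i, c in enumerate(a):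
--             found = False
--             for m in c:
--                 if found:
--                     break
--                 for c2_i, c2 in enumerate(b):
--                     if one_to_one and c2_i in has_seen:
--                         continue
--
--                     if m in c2:
--                         found = True
--                         matched_cluster.add(c2_i)
--                         has_seen.add(c2_i)
--                         break
--             if found:
--                 count_match += 1
--         return count_match, len(matched_cluster)
--
--     return count_cluster_match(predicted_clustering, gold_clustering)
-- ===== SOURCE B (Python) =====
-- def phi_for_clusters_rme(gold_clustering, predicted_clustering, one_to_one=False):
--     # Alternative strategy: build mention -> ascending list of gold-cluster indices
--     # once; each predicted mention is then resolved by a dict lookup instead of a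
--     # rescan of the whole gold clustering.
--     index = {}
--     for j, cluster in enumerate(gold_clustering):
--         for m in dict.fromkeys(cluster):
--             index.setdefault(m, []).append(j)
--     count_match = 0
--     matched = set()
--     for c in predicted_clustering:
--         hit = None
--         for m in c:
--             if one_to_one:
--                 hit = next((j for j in index.get(m, []) if j not in matched), None)
--             else:
--                 js = index.get(m, [])
--                 hit = js[0] if js else None
--             if hit is not None:
--                 break
--         if hit is not None:
--             count_match += 1
--             matched.add(hit)
--     return count_match, len(matched)
-- ===== Notes on version B (the rewrite author's own statement) =====
-- stated objective: alternative
-- what changed: B builds a mention-to-gold-cluster-indices dictionary once and resolves each predicted mention by a dict lookup (head / first-unseen of its index list) instead of A's rescan of the entire gold clustering per mention.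
import Mathlib
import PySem

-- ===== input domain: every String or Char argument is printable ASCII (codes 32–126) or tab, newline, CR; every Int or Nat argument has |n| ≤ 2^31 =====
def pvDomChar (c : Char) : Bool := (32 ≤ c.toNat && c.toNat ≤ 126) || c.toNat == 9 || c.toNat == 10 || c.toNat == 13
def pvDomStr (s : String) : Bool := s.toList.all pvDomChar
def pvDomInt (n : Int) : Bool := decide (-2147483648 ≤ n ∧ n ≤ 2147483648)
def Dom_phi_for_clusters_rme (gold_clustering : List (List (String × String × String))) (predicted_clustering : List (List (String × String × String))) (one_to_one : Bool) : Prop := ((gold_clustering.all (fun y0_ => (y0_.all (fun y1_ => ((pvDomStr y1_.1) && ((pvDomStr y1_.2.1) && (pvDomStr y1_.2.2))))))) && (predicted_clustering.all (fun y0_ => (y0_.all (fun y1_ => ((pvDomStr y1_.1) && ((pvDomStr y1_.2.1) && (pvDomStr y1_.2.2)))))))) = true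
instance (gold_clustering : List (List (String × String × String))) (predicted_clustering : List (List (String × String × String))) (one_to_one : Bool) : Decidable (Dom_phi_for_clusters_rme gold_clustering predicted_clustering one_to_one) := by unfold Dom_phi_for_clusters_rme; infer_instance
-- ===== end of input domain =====

-- B replaces A's rescan of the whole gold clustering per predicted mention by a
-- mention→gold-indices dictionary built once (objective: alternative algorithm).

-- ===== PORT A =====
-- innermost loop: 'for c2_i, c2 in enumerate(b): …'
def pvAGoldScan (one_to_one : Bool) (m : String × String × String)
    (b : List (Int × List (String × String × String))) (seen : PySem.Set Int) : Option Int :=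
  match b with
  | [] => none
  | (j, c2) :: rest =>
    if one_to_one && PySem.Set.contains seen j then pvAGoldScan one_to_one m rest seen
    else if c2.contains m then some j
    else pvAGoldScan one_to_one m rest seen

-- 'for m in c: if found: break; …'
def pvAMentionScan (one_to_one : Bool) (c : List (String × String × String))
    (b : List (Int × List (String × String × String))) (seen : PySem.Set Int) : Option Int :=
  match c with
  | [] => none
  | m :: rest =>
    match pvAGoldScan one_to_one m b seen with
    | some j => some j
    | none => pvAMentionScan one_to_one rest b seen

-- outer loop over a (= predicted_clustering); c_i is unused in A
def pvALoop (one_to_one : Bool) (b : List (Int × List (String × String × String)))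
    (a : List (List (String × String × String))) (count : Int)
    (matched seen : PySem.Set Int) : Int × PySem.Set Int :=
  match a with
  | [] => (count, matched)
  | c :: rest =>
    match pvAMentionScan one_to_one c b seen with
    | some j => pvALoop one_to_one b rest (count + 1) (PySem.Set.add matched j) (PySem.Set.add seen j)
    | none => pvALoop one_to_one b rest count matched seen

def phi_for_clusters_rme (gold_clustering : List (List (String × String × String))) (predicted_clustering : List (List (String × String × String))) (one_to_one : Bool) : Int × Int :=
  let r := pvALoop one_to_one (PySem.List.enumerate gold_clustering) predicted_clustering 0 PySem.Set.empty PySem.Set.empty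
  (r.1, PySem.List.len r.2)

-- ===== PORT B =====
-- 'for j, cluster in enumerate(gold): for m in dict.fromkeys(cluster): index.setdefault(m, []).append(j)'
def pvBIndex (gold : List (List (String × String × String))) :
    PySem.Dict (String × String × String) (List Int) :=
  (PySem.List.enumerate gold).foldl
    (fun d jc => (PySem.List.dedup jc.2).foldl (fun d m => d.modify m [] (· ++ [jc.1])) d)
    PySem.Dict.empty

-- 'next((j for j in index.get(m, []) if j not in matched), None)' / 'js[0] if js else None'
def pvBFind (one_to_one : Bool) (matched : PySem.Set Int) (js : List Int) : Option Int :=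
  if one_to_one then js.find? (fun j => !(PySem.Set.contains matched j)) else js.head?

-- 'for m in c: hit = …; if hit is not None: break'
def pvBMentionScan (one_to_one : Bool) (idx : PySem.Dict (String × String × String) (List Int))
    (c : List (String × String × String)) (matched : PySem.Set Int) : Option Int :=
  match c with
  | [] => none
  | m :: rest =>
    match pvBFind one_to_one matched (idx.getD m []) with
    | some j => some j
    | none => pvBMentionScan one_to_one idx rest matched

def pvBLoop (one_to_one : Bool) (idx : PySem.Dict (String × String × String) (List Int))
    (a : List (List (String × String × String))) (count : Int)
    (matched : PySem.Set Int) : Int × PySem.Set Int :=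
  match a with
  | [] => (count, matched)
  | c :: rest =>
    match pvBMentionScan one_to_one idx c matched with
    | some j => pvBLoop one_to_one idx rest (count + 1) (PySem.Set.add matched j)
    | none => pvBLoop one_to_one idx rest count matched

def phi_for_clusters_rme_alt (gold_clustering : List (List (String × String × String))) (predicted_clustering : List (List (String × String × String))) (one_to_one : Bool) : Int × Int :=
  let idx := pvBIndex gold_clustering
  let r := pvBLoop one_to_one idx predicted_clustering 0 PySem.Set.empty
  (r.1, PySem.List.len r.2)

-- ===== PRECONDITION & SPEC =====
def Spec_phi_for_clusters_rme (gold_clustering : List (List (String × String × String))) (predicted_clustering : List (List (String × String × String))) (one_to_one : Bool) (out : Int × Int) : Prop := out = phi_for_clusters_rme_alt gold_clustering predicted_clustering one_to_one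
instance (gold_clustering : List (List (String × String × String))) (predicted_clustering : List (List (String × String × String))) (one_to_one : Bool) (out : Int × Int) : Decidable (Spec_phi_for_clusters_rme gold_clustering predicted_clustering one_to_one out) := by unfold Spec_phi_for_clusters_rme; infer_instance

-- ===== CLAIM (what is proved, stated in full; the proofs are below) =====
def Claim_equal_phi_for_clusters_rme : Prop := ∀ (gold_clustering : List (List (String × String × String))) (predicted_clustering : List (List (String × String × String))) (one_to_one : Bool), Dom_phi_for_clusters_rme gold_clustering predicted_clustering one_to_one → Spec_phi_for_clusters_rme gold_clustering predicted_clustering one_to_one (phi_for_clusters_rme gold_clustering predicted_clustering one_to_one)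

-- ===== LEMMAS AND PROOFS =====

-- the per-mention hit list of a list of (index, cluster) pairs
def pvHits (m : String × String × String)
    (b : List (Int × List (String × String × String))) : List Int :=
  b.flatMap (fun p => if p.2.contains m then [p.1] else [])

-- nested foldl = foldl over the flattened pair list
theorem pv_foldl_nested {α β γ : Type} (h : γ → List β) (g : α → β → α) :
    ∀ (l : List γ) (d : α),
      l.foldl (fun d x => (h x).foldl g d) d = (l.flatMap h).foldl g d := by
  intro l
  induction l with
  | nil => intro d; rfl
  | cons x t ih => intro d; simp [List.foldl, List.flatMap_cons, List.foldl_append, ih]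

-- filter (· == m) on a Nodup list
theorem pv_filter_nodup {α : Type} [BEq α] [LawfulBEq α] (m : α) :
    ∀ (l : List α), l.Nodup → l.filter (fun x => x == m) = if m ∈ l then [m] else [] := by
  intro l
  induction l with
  | nil => intro _; simp
  | cons x t ih =>
    intro hnd
    rcases List.nodup_cons.mp hnd with ⟨hx, ht⟩
    by_cases hxm : x = m
    · subst hxm
      simp [ih ht, hx]
    · simp [beq_iff_eq, hxm, ih ht, Ne.symm hxm]

-- the index built by B delivers exactly the hit list
theorem pvBIndex_getD (gold : List (List (String × String × String)))
    (m : String × String × String) :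
    (pvBIndex gold).getD m [] = pvHits m (PySem.List.enumerate gold) := by
  unfold pvBIndex
  have h1 : ∀ (jc : Int × List (String × String × String))
      (d : PySem.Dict (String × String × String) (List Int)),
      (PySem.List.dedup jc.2).foldl (fun d m => d.modify m [] (· ++ [jc.1])) d
        = ((PySem.List.dedup jc.2).map (fun m => (m, jc.1))).foldl
            (fun d p => d.modify p.1 [] (· ++ [p.2])) d := by
    intro jc d
    rw [List.foldl_map]
  rw [show (fun (d : PySem.Dict (String × String × String) (List Int)) (jc : Int × List (String × String × String)) =>
      (PySem.List.dedup jc.2).foldl (fun d m => d.modify m [] (· ++ [jc.1])) d)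
      = fun d jc => ((PySem.List.dedup jc.2).map (fun m => (m, jc.1))).foldl
          (fun d p => d.modify p.1 [] (· ++ [p.2])) d from funext fun d => funext fun jc => h1 jc d]
  rw [pv_foldl_nested (fun jc => (PySem.List.dedup jc.2).map (fun m => (m, jc.1)))
      (fun (d : PySem.Dict (String × String × String) (List Int))
           (p : (String × String × String) × Int) => d.modify p.1 [] (· ++ [p.2]))
      (PySem.List.enumerate gold) PySem.Dict.empty]
  rw [PySem.Dict.getD_foldl_modify_append]
  rw [PySem.Dict.getD_empty]
  simp only [List.nil_append]
  -- filter/map over the flatMap, cluster by cluster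
  induction PySem.List.enumerate gold with
  | nil => rfl
  | cons jc t ih =>
    simp only [List.flatMap_cons, List.filter_append, List.map_append, ih, pvHits]
    congr 1
    rw [List.filter_map, List.map_map]
    have : ((fun p => p.1 == m) ∘ fun x => (x, jc.1)) = (fun x => x == m) := by
      funext x; simp
    rw [this, pv_filter_nodup m (PySem.List.dedup jc.2) (PySem.List.nodup_dedup jc.2)]
    by_cases hm : m ∈ jc.2
    · simp [hm]
    · simp [hm]

-- A's innermost scan = B's find over the hit list
theorem pvGoldScan_eq (one : Bool) (m : String × String × String) (seen : PySem.Set Int) :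
    ∀ (b : List (Int × List (String × String × String))),
      pvAGoldScan one m b seen = pvBFind one seen (pvHits m b) := by
  intro b
  induction b with
  | nil => cases one <;> rfl
  | cons p t ih =>
    obtain ⟨j, c2⟩ := p
    simp only [pvAGoldScan, pvHits, List.flatMap_cons]
    simp only [pvHits] at ih
    by_cases hc : c2.contains m = true
    · simp only [hc, if_true]
      by_cases hs : (one && PySem.Set.contains seen j) = true
      · have ho := ((Bool.and_eq_true _ _).mp hs).1
        have hsj := ((Bool.and_eq_true _ _).mp hs).2
        rw [if_pos hs, ih]
        subst ho
        have hmem : j ∈ seen := by simpa using hsj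
        simp [pvBFind, hmem]
      · rw [if_neg hs]
        cases one with
        | false => simp [pvBFind]
        | true =>
          have hmem : j ∉ seen := by simpa using hs
          simp [pvBFind, hmem]
    · have hc' : c2.contains m = false := by simpa using hc
      simp only [hc', Bool.false_eq_true, if_false, List.nil_append]
      split_ifs <;> exact ih

-- A's mention loop = B's mention loop (with the index)
theorem pvMentionScan_eq (one : Bool) (gold : List (List (String × String × String)))
    (seen : PySem.Set Int) :
    ∀ (c : List (String × String × String)),
      pvAMentionScan one c (PySem.List.enumerate gold) seen
        = pvBMentionScan one (pvBIndex gold) c seen := by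
  intro c
  induction c with
  | nil => rfl
  | cons m rest ih =>
    simp only [pvAMentionScan, pvBMentionScan, pvBIndex_getD, ← pvGoldScan_eq, ih]

-- the outer loops agree (A keeps two identical sets, B one)
theorem pvLoop_eq (one : Bool) (gold : List (List (String × String × String))) :
    ∀ (a : List (List (String × String × String))) (count : Int) (s : PySem.Set Int),
      pvALoop one (PySem.List.enumerate gold) a count s s
        = pvBLoop one (pvBIndex gold) a count s := by
  intro a
  induction a with
  | nil => intro count s; rfl
  | cons c rest ih =>
    intro count s
    simp only [pvALoop, pvBLoop, pvMentionScan_eq]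
    cases pvBMentionScan one (pvBIndex gold) c s with
    | none => exact ih count s
    | some j => exact ih (count + 1) (PySem.Set.add s j)

-- ===== VERDICT (by name: the statement is the Claim_ definition above) =====
theorem phi_for_clusters_rme_spec : Claim_equal_phi_for_clusters_rme := by
  intro gold pred one _
  unfold Spec_phi_for_clusters_rme phi_for_clusters_rme phi_for_clusters_rme_alt
  rw [pvLoop_eq]
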